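-- pv_equiv track=rewrite | github.com/cirosantilli/project-euler-solvers | solvers/417.py | gen_two_five_products
-- ===== SOURCE A (Python) =====
-- def gen_two_five_products(limit: int) -> list[int]:
--     """Return sorted list of all numbers of the form 2^a * 5^b <= limit."""
--     res = []
--     p2 = 1
--     while p2 <= limit:
--         p5 = 1
--         while p2 * p5 <= limit:
--             res.append(p2 * p5)
--             p5 *= 5
--         p2 *= 2
--     # size is small (~few hundred), so set() is fine
--     return sorted(set(res))
-- ===== SOURCE B (Python) =====
-- def gen_two_five_products(limit: int) -> list[int]:
--     """Return sorted list of all numbers of the form 2^a * 5^b <= limit."""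
--     def merge(xs, ys):
--         out = []
--         i = j = 0
--         while i < len(xs) and j < len(ys):
--             if xs[i] <= ys[j]:
--                 out.append(xs[i])
--                 i += 1
--             else:
--                 out.append(ys[j])
--                 j += 1
--         out.extend(xs[i:])
--         out.extend(ys[j:])
--         return out
--
--     res = []
--     p5 = 1
--     while p5 <= limit:
--         chain = []
--         p = p5
--         while p <= limit:
--             chain.append(p)
--             p *= 2
--         res = merge(res, chain)
--         p5 *= 5
--     return res
-- ===== Notes on version B (the rewrite author's own statement) =====
-- stated objective: alternative
-- what changed: B builds one already-sorted doubling chain per power of five and combines the chains with a sorted-list merge, so the answer comes out in order with no final sort and no dedup set, instead of A's nested product loops followed by sorting a set.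
import Mathlib
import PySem

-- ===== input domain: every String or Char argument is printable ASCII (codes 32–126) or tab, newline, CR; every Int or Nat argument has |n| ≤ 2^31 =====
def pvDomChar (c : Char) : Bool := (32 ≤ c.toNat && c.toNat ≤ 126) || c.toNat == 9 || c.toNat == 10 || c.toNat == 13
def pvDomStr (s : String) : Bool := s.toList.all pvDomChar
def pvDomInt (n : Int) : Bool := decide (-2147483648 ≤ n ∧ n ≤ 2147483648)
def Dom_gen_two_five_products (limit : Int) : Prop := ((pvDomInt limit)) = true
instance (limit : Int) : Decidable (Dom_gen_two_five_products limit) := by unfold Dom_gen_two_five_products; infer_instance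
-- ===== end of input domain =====

-- B replaces A's nested product loops + sorted(set(...)) by merging one sorted doubling chain
-- per power of five (a sorted-list merge), so the result comes out already sorted with no final
-- sort and no dedup set; objective: alternative algorithm of similar cost.

-- ===== PORT A =====
-- inner while loop: 'while p2 * p5 <= limit: res.append(p2*p5); p5 *= 5'
-- (the positivity hypotheses only serve Lean's termination proof; Python's loop values are always positive)
def pvAInner (limit p2 p5 : Int) (hp2 : 0 < p2) (hp5 : 0 < p5) (res : List Int) : List Int :=
  if p2 * p5 ≤ limit then
    pvAInner limit p2 (p5 * 5) hp2 (by positivity) (res ++ [p2 * p5])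
  else res
termination_by (limit + 1 - p2 * p5).toNat
decreasing_by
  have h1 : 0 < p2 * p5 := by positivity
  have h2 : p2 * (p5 * 5) = 5 * (p2 * p5) := by ring
  omega

-- outer while loop: 'while p2 <= limit: <inner>; p2 *= 2'
def pvAOuter (limit p2 : Int) (hp2 : 0 < p2) (res : List Int) : List Int :=
  if p2 ≤ limit then
    pvAOuter limit (p2 * 2) (by positivity) (pvAInner limit p2 1 hp2 one_pos res)
  else res
termination_by (limit + 1 - p2).toNat
decreasing_by omega

def gen_two_five_products (limit : Int) : List Int :=
  PySem.List.sorted (PySem.Set.ofList (pvAOuter limit 1 one_pos [])) (fun x => x) false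

-- ===== PORT B =====
-- merge(xs, ys): hand-written two-pointer merge of two sorted lists
def pvMerge : List Int → List Int → List Int
  | [], ys => ys
  | x :: xs, [] => x :: xs
  | x :: xs, y :: ys =>
    if x ≤ y then x :: pvMerge xs (y :: ys) else y :: pvMerge (x :: xs) ys

-- 'chain = []; p = p5; while p <= limit: chain.append(p); p *= 2'
def pvChain (limit p : Int) (hp : 0 < p) : List Int :=
  if p ≤ limit then p :: pvChain limit (p * 2) (by positivity) else []
termination_by (limit + 1 - p).toNat
decreasing_by omega

-- 'while p5 <= limit: <build chain>; res = merge(res, chain); p5 *= 5'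
def pvBOuter (limit p5 : Int) (hp5 : 0 < p5) (res : List Int) : List Int :=
  if p5 ≤ limit then
    pvBOuter limit (p5 * 5) (by positivity) (pvMerge res (pvChain limit p5 hp5))
  else res
termination_by (limit + 1 - p5).toNat
decreasing_by omega

def gen_two_five_products_alt (limit : Int) : List Int :=
  pvBOuter limit 1 one_pos []

-- ===== PRECONDITION & SPEC =====
def Spec_gen_two_five_products (limit : Int) (out : List Int) : Prop := out = gen_two_five_products_alt limit
instance (limit : Int) (out : List Int) : Decidable (Spec_gen_two_five_products limit out) := by unfold Spec_gen_two_five_products; infer_instance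

-- ===== CLAIM (what is proved, stated in full; the proofs are below) =====
def Claim_equal_gen_two_five_products : Prop := ∀ (limit : Int), Dom_gen_two_five_products limit → Spec_gen_two_five_products limit (gen_two_five_products limit)

-- ===== LEMMAS AND PROOFS =====

-- membership in A's inner loop results
lemma mem_pvAInner (limit p2 p5 : Int) (hp2 : 0 < p2) (hp5 : 0 < p5) (res : List Int) (n : Int) :
    n ∈ pvAInner limit p2 p5 hp2 hp5 res ↔
      n ∈ res ∨ ∃ j : ℕ, n = p2 * p5 * 5 ^ j ∧ n ≤ limit := by
  fun_induction pvAInner limit p2 p5 hp2 hp5 res with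
  | case1 p5 hp5 res h ih =>
    rw [ih, List.mem_append, List.mem_singleton]
    constructor
    · rintro ((h1 | rfl) | ⟨j, rfl, hj⟩)
      · exact Or.inl h1
      · exact Or.inr ⟨0, by ring, h⟩
      · exact Or.inr ⟨j + 1, by ring, hj⟩
    · rintro (h1 | ⟨j, rfl, hj⟩)
      · exact Or.inl (Or.inl h1)
      · cases j with
        | zero => exact Or.inl (Or.inr (by ring))
        | succ k => exact Or.inr ⟨k, by ring, hj⟩
  | case2 p5 hp5 res h =>
    constructor
    · exact Or.inl
    · rintro (h1 | ⟨j, rfl, hj⟩)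
      · exact h1
      · exfalso
        have h5 : (1:ℤ) ≤ 5 ^ j := one_le_pow₀ (by norm_num)
        have hpos : 0 < p2 * p5 := by positivity
        nlinarith

-- membership in A's outer loop results
lemma mem_pvAOuter (limit p2 : Int) (hp2 : 0 < p2) (res : List Int) (n : Int) :
    n ∈ pvAOuter limit p2 hp2 res ↔
      n ∈ res ∨ ∃ i j : ℕ, n = p2 * 2 ^ i * 5 ^ j ∧ n ≤ limit := by
  fun_induction pvAOuter limit p2 hp2 res with
  | case1 p2 hp2 res h ih =>
    rw [ih, mem_pvAInner]
    constructor
    · rintro ((h1 | ⟨j, rfl, hj⟩) | ⟨i, j, rfl, hj⟩)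
      · exact Or.inl h1
      · exact Or.inr ⟨0, j, by ring, hj⟩
      · exact Or.inr ⟨i + 1, j, by ring, hj⟩
    · rintro (h1 | ⟨i, j, rfl, hj⟩)
      · exact Or.inl (Or.inl h1)
      · cases i with
        | zero => exact Or.inl (Or.inr ⟨j, by ring, hj⟩)
        | succ k => exact Or.inr ⟨k, j, by ring, hj⟩
  | case2 p2 hp2 res h =>
    constructor
    · exact Or.inl
    · rintro (h1 | ⟨i, j, rfl, hj⟩)
      · exact h1
      · exfalso
        have h2 : (1:ℤ) ≤ 2 ^ i := one_le_pow₀ (by norm_num)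
        have h5 : (1:ℤ) ≤ 5 ^ j := one_le_pow₀ (by norm_num)
        have ha : p2 ≤ p2 * 2 ^ i := le_mul_of_one_le_right hp2.le h2
        have hb : p2 * 2 ^ i ≤ p2 * 2 ^ i * 5 ^ j := le_mul_of_one_le_right (by positivity) h5
        linarith

lemma mem_pvChain (limit p : Int) (hp : 0 < p) (n : Int) :
    n ∈ pvChain limit p hp ↔ ∃ i : ℕ, n = p * 2 ^ i ∧ n ≤ limit := by
  fun_induction pvChain limit p hp with
  | case1 p hp h ih =>
    rw [List.mem_cons, ih]
    constructor
    · rintro (rfl | ⟨i, rfl, hi⟩)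
      · exact ⟨0, by ring, h⟩
      · exact ⟨i + 1, by ring, hi⟩
    · rintro ⟨i, rfl, hi⟩
      cases i with
      | zero => exact Or.inl (by ring)
      | succ k => exact Or.inr ⟨k, by ring, hi⟩
  | case2 p hp h =>
    simp only [List.not_mem_nil, false_iff]
    rintro ⟨i, rfl, hi⟩
    have h2 : (1:ℤ) ≤ 2 ^ i := one_le_pow₀ (by norm_num)
    nlinarith

lemma pvChain_pairwise (limit p : Int) (hp : 0 < p) :
    (pvChain limit p hp).Pairwise (· < ·) := by
  fun_induction pvChain limit p hp with
  | case1 p hp h ih =>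
    refine List.pairwise_cons.2 ⟨?_, ih⟩
    intro y hy
    obtain ⟨i, rfl, -⟩ := (mem_pvChain limit (p * 2) (by positivity) y).1 hy
    have h2 : (1:ℤ) ≤ 2 ^ i := one_le_pow₀ (by norm_num)
    nlinarith
  | case2 p hp h => exact List.Pairwise.nil

lemma pvMerge_perm (xs ys : List Int) : (pvMerge xs ys).Perm (xs ++ ys) := by
  fun_induction pvMerge xs ys with
  | case1 ys => simp
  | case2 x xs => simp
  | case3 x xs y ys h ih => exact ih.cons x
  | case4 x xs y ys h ih => exact (ih.cons y).trans List.perm_middle.symm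

lemma mem_pvMerge (xs ys : List Int) (n : Int) :
    n ∈ pvMerge xs ys ↔ n ∈ xs ∨ n ∈ ys := by
  rw [(pvMerge_perm xs ys).mem_iff, List.mem_append]

lemma pvMerge_pairwise_lt (xs ys : List Int)
    (hx : xs.Pairwise (· < ·)) (hy : ys.Pairwise (· < ·))
    (hd : ∀ a ∈ xs, ∀ b ∈ ys, a ≠ b) :
    (pvMerge xs ys).Pairwise (· < ·) := by
  fun_induction pvMerge xs ys with
  | case1 ys => exact hy
  | case2 x xs => exact hx
  | case3 x xs y ys h ih =>
    obtain ⟨hx1, hx2⟩ := List.pairwise_cons.1 hx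
    refine List.pairwise_cons.2 ⟨?_, ih hx2 hy (fun a ha b hb => hd a (List.mem_cons_of_mem x ha) b hb)⟩
    intro z hz
    rcases (mem_pvMerge _ _ z).1 hz with hzx | hzy
    · exact hx1 z hzx
    · rcases List.mem_cons.1 hzy with rfl | hzy'
      · exact lt_of_le_of_ne h (hd x List.mem_cons_self z hzy)
      · exact lt_of_le_of_lt h ((List.pairwise_cons.1 hy).1 z hzy')
  | case4 x xs y ys h ih =>
    obtain ⟨hy1, hy2⟩ := List.pairwise_cons.1 hy
    refine List.pairwise_cons.2 ⟨?_, ih hx hy2 (fun a ha b hb => hd a ha b (List.mem_cons_of_mem y hb))⟩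
    intro z hz
    have hyx : y < x := lt_of_not_ge h
    rcases (mem_pvMerge _ _ z).1 hz with hzx | hzy
    · rcases List.mem_cons.1 hzx with rfl | hzx'
      · exact hyx
      · exact hyx.trans ((List.pairwise_cons.1 hx).1 z hzx')
    · exact hy1 z hzy

-- uniqueness of 2–5 factorizations
lemma two_five_inj_nat (a b c d : ℕ) (h : 2 ^ a * 5 ^ b = 2 ^ c * 5 ^ d) : a = c ∧ b = d := by
  induction a generalizing c with
  | zero =>
    cases c with
    | zero =>
      simp only [pow_zero, one_mul] at h
      exact ⟨rfl, Nat.pow_right_injective (by norm_num) h⟩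
    | succ c' =>
      exfalso
      simp only [pow_zero, one_mul] at h
      have h2 : 2 ∣ 5 ^ b := ⟨2 ^ c' * 5 ^ d, by rw [h]; ring⟩
      have := Nat.Prime.dvd_of_dvd_pow Nat.prime_two h2
      omega
  | succ a' ih =>
    cases c with
    | zero =>
      exfalso
      simp only [pow_zero, one_mul] at h
      have h2 : 2 ∣ 5 ^ d := ⟨2 ^ a' * 5 ^ b, by rw [← h]; ring⟩
      have := Nat.Prime.dvd_of_dvd_pow Nat.prime_two h2
      omega
    | succ c' =>
      have hx : 2 * (2 ^ a' * 5 ^ b) = 2 * (2 ^ c' * 5 ^ d) := by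
        rw [pow_succ, pow_succ] at h; ring_nf at h ⊢; omega
      have h' : 2 ^ a' * 5 ^ b = 2 ^ c' * 5 ^ d := by omega
      obtain ⟨h1, h2⟩ := ih c' h'
      exact ⟨by omega, h2⟩

lemma two_five_inj_int (a b c d : ℕ) (h : (2 : ℤ) ^ a * 5 ^ b = 2 ^ c * 5 ^ d) : a = c ∧ b = d := by
  have : ((2 ^ a * 5 ^ b : ℕ) : ℤ) = ((2 ^ c * 5 ^ d : ℕ) : ℤ) := by push_cast; exact h
  exact two_five_inj_nat a b c d (by exact_mod_cast this)

lemma mem_pvBOuter (limit p5 : Int) (hp5 : 0 < p5) (res : List Int) (n : Int) :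
    n ∈ pvBOuter limit p5 hp5 res ↔
      n ∈ res ∨ ∃ i j : ℕ, n = p5 * 5 ^ j * 2 ^ i ∧ n ≤ limit := by
  fun_induction pvBOuter limit p5 hp5 res with
  | case1 p5 hp5 res h ih =>
    rw [ih]
    constructor
    · rintro (hm | ⟨i, j, rfl, hj⟩)
      · rcases (mem_pvMerge _ _ n).1 hm with h1 | h1
        · exact Or.inl h1
        · obtain ⟨i, rfl, hi⟩ := (mem_pvChain _ _ _ n).1 h1
          exact Or.inr ⟨i, 0, by ring, hi⟩
      · exact Or.inr ⟨i, j + 1, by ring, hj⟩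
    · rintro (h1 | ⟨i, j, rfl, hj⟩)
      · exact Or.inl ((mem_pvMerge _ _ n).2 (Or.inl h1))
      · cases j with
        | zero =>
          exact Or.inl ((mem_pvMerge _ _ _).2 (Or.inr ((mem_pvChain _ _ _ _).2 ⟨i, by ring, hj⟩)))
        | succ k => exact Or.inr ⟨i, k, by ring, hj⟩
  | case2 p5 hp5 res h =>
    constructor
    · exact Or.inl
    · rintro (h1 | ⟨i, j, rfl, hj⟩)
      · exact h1
      · exfalso
        have h2 : (1:ℤ) ≤ 2 ^ i := one_le_pow₀ (by norm_num)
        have h5 : (1:ℤ) ≤ 5 ^ j := one_le_pow₀ (by norm_num)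
        have ha : p5 ≤ p5 * 5 ^ j := le_mul_of_one_le_right hp5.le h5
        have hb : p5 * 5 ^ j ≤ p5 * 5 ^ j * 2 ^ i := le_mul_of_one_le_right (by positivity) h2
        linarith

lemma pvBOuter_pairwise (limit p5 : Int) (hp5 : 0 < p5) (res : List Int) (b : ℕ)
    (hpow : p5 = 5 ^ b)
    (hmem : ∀ n ∈ res, ∃ i j : ℕ, j < b ∧ n = 2 ^ i * 5 ^ j)
    (hres : res.Pairwise (· < ·)) :
    (pvBOuter limit p5 hp5 res).Pairwise (· < ·) := by
  fun_induction pvBOuter limit p5 hp5 res generalizing b with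
  | case1 p5 hp5 res h ih =>
    subst hpow
    refine ih (b + 1) (by ring) ?_ ?_
    · intro n hn
      rcases (mem_pvMerge _ _ n).1 hn with h1 | h1
      · obtain ⟨i, j, hj, rfl⟩ := hmem n h1
        exact ⟨i, j, by omega, rfl⟩
      · obtain ⟨i, rfl, -⟩ := (mem_pvChain _ _ _ n).1 h1
        exact ⟨i, b, by omega, by ring⟩
    · refine pvMerge_pairwise_lt _ _ hres (pvChain_pairwise _ _ _) ?_
      intro x hx y hy
      obtain ⟨i, j, hj, rfl⟩ := hmem x hx
      obtain ⟨i', rfl, -⟩ := (mem_pvChain _ _ _ y).1 hy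
      intro heq
      have heq' : (2:ℤ) ^ i * 5 ^ j = 2 ^ i' * 5 ^ b := by rw [heq]; ring
      obtain ⟨-, h2⟩ := two_five_inj_int i j i' b heq'
      omega
  | case2 p5 hp5 res h => exact hres

-- ===== VERDICT (by name: the statement is the Claim_ definition above) =====
theorem gen_two_five_products_spec : Claim_equal_gen_two_five_products := by
  intro limit _
  unfold Spec_gen_two_five_products gen_two_five_products gen_two_five_products_alt
  have hBpw : (pvBOuter limit 1 one_pos []).Pairwise (· < ·) :=
    pvBOuter_pairwise limit 1 one_pos [] 0 (by norm_num) (by simp) List.Pairwise.nil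
  have hBnodup : (pvBOuter limit 1 one_pos []).Nodup :=
    hBpw.imp ne_of_lt
  have hperm : (pvBOuter limit 1 one_pos []).Perm
      (PySem.Set.ofList (pvAOuter limit 1 one_pos [])) := by
    rw [List.perm_ext_iff_of_nodup hBnodup (PySem.Set.nodup_ofList _)]
    intro n
    rw [PySem.Set.mem_ofList, mem_pvBOuter, mem_pvAOuter]
    simp only [List.not_mem_nil, false_or]
    constructor
    · rintro ⟨i, j, rfl, hle⟩; exact ⟨i, j, by ring, hle⟩
    · rintro ⟨i, j, rfl, hle⟩; exact ⟨i, j, by ring, hle⟩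
  exact PySem.List.sorted_id_eq_of_perm_of_pairwise _ _ hperm (hBpw.imp le_of_lt)
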